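-- pv_equiv track=rewrite | github.com/littleAvel/leetcode_problems | maths/hard/problem_564_find_the_closest_palindrome.py | half_to_palindrome
-- ===== SOURCE A (Python) =====
-- def half_to_palindrome(left: int, even: bool) -> int:
--     res = left
--     if not even:
--         left = left // 10
--     while left > 0:
--         res = res * 10 + left % 10
--         left //= 10
--     return res
-- ===== SOURCE B (Python) =====
-- def _mirror(n):
--     # returns (reverse of n's decimal digits as an int, 10 ** number_of_digits(n)); n >= 0
--     if n == 0:
--         return (0, 1)
--     r, p = _mirror(n // 10)
--     return (r + n % 10 * p, 10 * p)
--
--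
-- def half_to_palindrome(left: int, even: bool) -> int:
--     if left < 0:
--         return left
--     r, p = _mirror(left if even else left // 10)
--     return left * p + r
-- ===== Notes on version B (the rewrite author's own statement) =====
-- stated objective: alternative
-- what changed: Replaces the iterative accumulator loop (res = res*10 + digit, mutating res and left in lockstep) by a recursive helper that returns the pair (reversed digits of n, 10^numdigits(n)) and a single closed-form combine left * p + r.
import Mathlib
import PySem

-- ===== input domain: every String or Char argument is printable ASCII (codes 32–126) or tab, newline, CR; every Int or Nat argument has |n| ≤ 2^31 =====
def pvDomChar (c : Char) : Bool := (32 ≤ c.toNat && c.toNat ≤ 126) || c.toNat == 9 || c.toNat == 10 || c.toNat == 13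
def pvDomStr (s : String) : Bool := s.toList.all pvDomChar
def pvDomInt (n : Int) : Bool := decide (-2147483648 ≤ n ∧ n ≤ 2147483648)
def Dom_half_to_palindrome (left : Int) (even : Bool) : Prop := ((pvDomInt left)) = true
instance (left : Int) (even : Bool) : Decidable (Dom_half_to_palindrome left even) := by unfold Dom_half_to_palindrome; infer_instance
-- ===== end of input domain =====

-- B replaces A's iterative accumulator loop by a recursive helper returning
-- (reversed digits, 10^numdigits) combined once as left * p + r; objective: alternative.

-- ===== PORT A =====
-- the 'while left > 0' loop of A: res ← res*10 + left % 10; left ← left // 10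
def halfLoopA (res n : Int) : Int :=
  if h : 0 < n then
    halfLoopA (res * 10 + PySem.Int.mod n 10) (PySem.Int.floordiv n 10)
  else
    res
termination_by n.toNat
decreasing_by
  have hb : (0:Int) < 10 := by norm_num
  have h1 : PySem.Int.floordiv n 10 < n := by
    rw [PySem.Int.floordiv_lt_iff_lt_mul hb]; omega
  have h2 : (0:Int) ≤ PySem.Int.floordiv n 10 := by
    rw [PySem.Int.le_floordiv_iff_mul_le hb]; omega
  omega

def half_to_palindrome (left : Int) (even : Bool) : Int :=
  let left' := if !even then PySem.Int.floordiv left 10 else left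
  halfLoopA left left'

-- ===== PORT B =====
-- _mirror of Source B; it is only ever called on a nonnegative argument, so it is
-- ported as Nat recursion (Nat / and % agree with Python // and % there).
def mirrorB (n : Nat) : Int × Int :=
  if n = 0 then (0, 1)
  else
    let rp := mirrorB (n / 10)
    (rp.1 + (n % 10 : Nat) * rp.2, 10 * rp.2)

def half_to_palindrome_alt (left : Int) (even : Bool) : Int :=
  if left < 0 then left
  else
    let rp := mirrorB (if even then left else PySem.Int.floordiv left 10).toNat
    left * rp.2 + rp.1

-- ===== PRECONDITION & SPEC =====
def Spec_half_to_palindrome (left : Int) (even : Bool) (out : Int) : Prop := out = half_to_palindrome_alt left even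
instance (left : Int) (even : Bool) (out : Int) : Decidable (Spec_half_to_palindrome left even out) := by unfold Spec_half_to_palindrome; infer_instance

-- ===== CLAIM (what is proved, stated in full; the proofs are below) =====
def Claim_equal_half_to_palindrome : Prop := ∀ (left : Int) (even : Bool), Dom_half_to_palindrome left even → Spec_half_to_palindrome left even (half_to_palindrome left even)

-- ===== LEMMAS AND PROOFS =====
theorem halfLoopA_nonpos (res n : Int) (h : ¬ 0 < n) : halfLoopA res n = res := by
  rw [halfLoopA]; simp [h]

theorem floordiv_natCast_ten (m : Nat) :
    PySem.Int.floordiv (m : Int) 10 = ((m / 10 : Nat) : Int) := by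
  simp [pysem]

theorem mod_natCast_ten (m : Nat) :
    PySem.Int.mod (m : Int) 10 = ((m % 10 : Nat) : Int) := by
  simp [pysem]

theorem halfLoopA_eq_mirror (n : Nat) (res : Int) :
    halfLoopA res (n : Int) = res * (mirrorB n).2 + (mirrorB n).1 := by
  induction n using Nat.strong_induction_on generalizing res with
  | _ n ih =>
    by_cases h0 : n = 0
    · subst h0
      rw [halfLoopA_nonpos _ _ (by norm_num), mirrorB]
      simp
    · rw [halfLoopA]
      have hpos : (0:Int) < (n : Int) := by exact_mod_cast Nat.pos_of_ne_zero h0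
      rw [dif_pos hpos, floordiv_natCast_ten, mod_natCast_ten,
        ih (n / 10) (Nat.div_lt_self (Nat.pos_of_ne_zero h0) (by norm_num))]
      conv_rhs => rw [mirrorB]
      simp only [h0, ite_false]
      ring

theorem halfLoopA_eq_mirror' (res h : Int) (hh : 0 ≤ h) :
    halfLoopA res h = res * (mirrorB h.toNat).2 + (mirrorB h.toNat).1 := by
  obtain ⟨n, rfl⟩ := Int.eq_ofNat_of_zero_le hh
  rw [halfLoopA_eq_mirror]
  simp

-- ===== VERDICT (by name: the statement is the Claim_ definition above) =====
theorem half_to_palindrome_spec : Claim_equal_half_to_palindrome := by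
  intro left even _
  unfold Spec_half_to_palindrome half_to_palindrome half_to_palindrome_alt
  by_cases hneg : left < 0
  · -- the while loop never runs: left (or left // 10) is not positive
    have hfd : PySem.Int.floordiv left 10 < 0 := by
      rw [PySem.Int.floordiv_lt_iff_lt_mul (show (0:Int) < 10 by norm_num)]; omega
    simp only [hneg, if_pos]
    cases even <;>
      simp only [Bool.not_true, Bool.not_false, ite_true] <;>
      exact halfLoopA_nonpos _ _ (by omega)
  · have hge : 0 ≤ left := by omega
    have hfd0 : 0 ≤ PySem.Int.floordiv left 10 := by
      rw [PySem.Int.le_floordiv_iff_mul_le (show (0:Int) < 10 by norm_num)]; omega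
    simp only [hneg, ite_false]
    cases even <;> simp only [Bool.not_true, Bool.not_false, ite_true]
    · exact halfLoopA_eq_mirror' left (PySem.Int.floordiv left 10) hfd0
    · exact halfLoopA_eq_mirror' left left hge
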